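-- pv_equiv track=rewrite | github.com/sunwupark/Algorithm | 프로그래머스/2/138476. 귤 고르기/귤 고르기.py | solution
-- ===== SOURCE A (Python) =====
-- def solution(k, tangerine):
--     answer = 0
--     from collections import Counter
--     countList = Counter(tangerine)
--     setList = list(set(tangerine))
--     setList.sort(key=lambda x: -countList[x])
--
--     for val in range(len(setList)):
--         if k-countList[setList[val]] <= 0:
--             return val+1
--         k-=countList[setList[val]]
--
--
--     return answer
-- ===== SOURCE B (Python) =====
-- from collections import Counter
-- from itertools import accumulate
-- from bisect import bisect_left
--
--
-- def solution(k, tangerine):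
--     counts = sorted(Counter(tangerine).values(), reverse=True)
--     cum = list(accumulate(counts))
--     idx = bisect_left(cum, k)
--     return idx + 1 if idx < len(cum) else 0
-- ===== Notes on version B (the rewrite author's own statement) =====
-- stated objective: faster
-- what changed: Replaces the decrement-k greedy scan over sorted distinct elements with sorting the Counter's values descending, building a prefix-sum table with accumulate, and binary-searching it with bisect_left for the first prefix reaching k.
import Mathlib
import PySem

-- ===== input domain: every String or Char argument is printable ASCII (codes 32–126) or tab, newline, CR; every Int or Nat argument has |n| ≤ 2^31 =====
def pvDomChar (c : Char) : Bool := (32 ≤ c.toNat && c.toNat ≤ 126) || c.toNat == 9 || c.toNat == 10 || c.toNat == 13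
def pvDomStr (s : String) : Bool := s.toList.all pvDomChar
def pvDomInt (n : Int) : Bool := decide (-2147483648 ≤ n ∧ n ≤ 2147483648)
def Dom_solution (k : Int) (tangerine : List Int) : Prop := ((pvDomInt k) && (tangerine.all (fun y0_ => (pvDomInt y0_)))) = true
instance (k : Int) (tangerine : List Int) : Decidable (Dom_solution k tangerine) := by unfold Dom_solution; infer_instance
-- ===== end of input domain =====

-- B sorts the Counter's values descending, builds a prefix-sum table and binary-searches it
-- (bisect_left) instead of A's decrement-k greedy scan; same cost class, different algorithm.

-- ===== PORT A =====
-- the 'for val in range(len(setList))' loop: k is decremented, val counts up, fall-through returns answer = 0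
def solutionLoop (d : PySem.Dict Int Int) : Int → List Int → Int → Int
  | _, [], _ => 0
  | k, x :: rest, val =>
      if k - d.getD x 0 ≤ 0 then val + 1
      else solutionLoop d (k - d.getD x 0) rest (val + 1)

def solution (k : Int) (tangerine : List Int) : Int :=
  let countList := PySem.Dict.counter tangerine
  let setList := PySem.List.sorted (PySem.Set.ofList tangerine) (fun x => -(countList.getD x 0)) false
  solutionLoop countList k setList 0

-- ===== PORT B =====
-- itertools.accumulate on ints, ported by hand (exact: running sums, empty on empty input)
def pyAccumulate : Int → List Int → List Int
  | _, [] => []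
  | acc, x :: xs => (acc + x) :: pyAccumulate (acc + x) xs

def solution_alt (k : Int) (tangerine : List Int) : Int :=
  let counts := PySem.List.sorted (PySem.Dict.counter tangerine).values (fun x => x) true
  let cum := pyAccumulate 0 counts
  let idx := PySem.List.bisectLeft cum k
  if (idx : Int) < cum.length then (idx : Int) + 1 else 0

-- ===== PRECONDITION & SPEC =====
def Spec_solution (k : Int) (tangerine : List Int) (out : Int) : Prop := out = solution_alt k tangerine
instance (k : Int) (tangerine : List Int) (out : Int) : Decidable (Spec_solution k tangerine out) := by unfold Spec_solution; infer_instance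

-- ===== CLAIM (what is proved, stated in full; the proofs are below) =====
def Claim_equal_solution : Prop := ∀ (k : Int) (tangerine : List Int), Dom_solution k tangerine → Spec_solution k tangerine (solution k tangerine)

-- ===== LEMMAS AND PROOFS =====

-- insertBy commutes with map when the comparison factors through the map
theorem pv_map_insertBy {α β : Type} (m : α → β) (p : α → α → Bool) (p' : β → β → Bool)
    (hp : ∀ a b, p a b = p' (m a) (m b)) (x : α) (ys : List α) :
    (PySem.List.insertBy p x ys).map m = PySem.List.insertBy p' (m x) (ys.map m) := by
  induction ys with
  | nil => simp [PySem.List.insertBy]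
  | cons y ys ih =>
      simp only [PySem.List.insertBy, List.map_cons, hp]
      by_cases h : p' (m x) (m y) = true
      · simp [h]
      · simp [h, ih]

theorem pv_map_foldl_insertBy {α β : Type} (m : α → β) (p : α → α → Bool) (p' : β → β → Bool)
    (hp : ∀ a b, p a b = p' (m a) (m b)) (xs acc : List α) :
    (xs.foldl (fun acc x => PySem.List.insertBy p x acc) acc).map m
      = (xs.map m).foldl (fun acc y => PySem.List.insertBy p' y acc) (acc.map m) := by
  induction xs generalizing acc with
  | nil => rfl
  | cons x xs ih => simp only [List.foldl_cons, List.map_cons, ih, pv_map_insertBy m p p' hp]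

-- mapping the count over A's key-sorted distinct list IS B's reverse-sorted values list
theorem pv_map_sorted_key (c : Int → Int) (xs : List Int) :
    (PySem.List.sorted xs (fun x => -(c x)) false).map c
      = PySem.List.sorted (xs.map c) (fun x => x) true := by
  rw [PySem.List.sorted_eq_foldl_insertBy, PySem.List.sorted_rev_eq_foldl_insertBy]
  rw [pv_map_foldl_insertBy c _ (fun u v => decide (v < u)) (fun a b => by rw [decide_eq_decide]; omega)]
  rfl

theorem pv_length_pyAccumulate (a : Int) (cs : List Int) :
    (pyAccumulate a cs).length = cs.length := by
  induction cs generalizing a with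
  | nil => rfl
  | cons x xs ih => simp [pyAccumulate, ih]

theorem pv_pyAccumulate_shift (a : Int) (cs : List Int) :
    pyAccumulate a cs = (pyAccumulate 0 cs).map (fun t => a + t) := by
  induction cs generalizing a with
  | nil => rfl
  | cons x xs ih =>
      simp only [pyAccumulate]
      rw [ih (a + x), ih (0 + x), List.map_cons, List.map_map]
      congr 1
      · omega
      · exact List.map_congr_left (fun t _ => by simp only [Function.comp]; omega)

theorem pv_pyAccumulate_pos (cs : List Int) (h : ∀ x ∈ cs, 0 < x) :
    ∀ t ∈ pyAccumulate 0 cs, 0 < t := by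
  induction cs with
  | nil => simp [pyAccumulate]
  | cons x xs ih =>
      intro t ht
      simp only [pyAccumulate, zero_add, List.mem_cons] at ht
      rcases ht with h1 | h2
      · exact h1 ▸ h x (List.mem_cons_self)
      · rw [pv_pyAccumulate_shift] at h2
        obtain ⟨u, hu, rfl⟩ := List.mem_map.mp h2
        have := ih (fun y hy => h y (List.mem_cons_of_mem _ hy)) u hu
        have := h x (List.mem_cons_self)
        omega

theorem pv_pyAccumulate_sorted (cs : List Int) (h : ∀ x ∈ cs, 0 < x) :
    (pyAccumulate 0 cs).Pairwise (fun a b => a ≤ b) := by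
  induction cs with
  | nil => simp [pyAccumulate]
  | cons x xs ih =>
      simp only [pyAccumulate, zero_add]
      rw [pv_pyAccumulate_shift]
      constructor
      · intro b hb
        obtain ⟨u, hu, rfl⟩ := List.mem_map.mp hb
        have := pv_pyAccumulate_pos xs (fun y hy => h y (List.mem_cons_of_mem _ hy)) u hu
        omega
      · exact List.Pairwise.map _ (fun a b hab => by omega)
          (ih (fun y hy => h y (List.mem_cons_of_mem _ hy)))

-- A's loop, rephrased over the list of counts
def pvScan : List Int → Int → Int → Int
  | [], _, _ => 0
  | c :: cs, k, v => if k - c ≤ 0 then v + 1 else pvScan cs (k - c) (v + 1)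

theorem pv_loop_eq_scan (d : PySem.Dict Int Int) (ys : List Int) (k v : Int) :
    solutionLoop d k ys v = pvScan (ys.map (fun x => d.getD x 0)) k v := by
  induction ys generalizing k v with
  | nil => rfl
  | cons x xs ih => simp only [solutionLoop, pvScan, List.map_cons, ih]

theorem pv_scan_none (cs : List Int) (k v : Int)
    (h : ∀ (j : Nat) (hj : j < cs.length), (pyAccumulate 0 cs)[j]'(by rw [pv_length_pyAccumulate]; exact hj) < k) :
    pvScan cs k v = 0 := by
  induction cs generalizing k v with
  | nil => rfl
  | cons c cs ih =>
      have h0 := h 0 (by simp)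
      simp only [pyAccumulate, zero_add, List.getElem_cons_zero] at h0
      simp only [pvScan, if_neg (by omega : ¬ k - c ≤ 0)]
      apply ih
      intro j hj
      have hj' := h (j + 1) (by simpa using Nat.succ_lt_succ hj)
      simp only [pyAccumulate, zero_add, List.getElem_cons_succ] at hj'
      simp only [pv_pyAccumulate_shift c, List.getElem_map] at hj'
      omega

theorem pv_scan_some (cs : List Int) (k v : Int) (i : Nat) (hi : i < cs.length)
    (hk : k ≤ (pyAccumulate 0 cs)[i]'(by rw [pv_length_pyAccumulate]; exact hi))
    (hmin : ∀ (j : Nat) (hj : j < i), (pyAccumulate 0 cs)[j]'(by rw [pv_length_pyAccumulate]; omega) < k) :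
    pvScan cs k v = v + i + 1 := by
  induction cs generalizing k v i with
  | nil => exact absurd hi (by simp)
  | cons c cs ih =>
      cases i with
      | zero =>
          simp only [pyAccumulate, zero_add, List.getElem_cons_zero] at hk
          simp only [pvScan, if_pos (by omega : k - c ≤ 0)]
          omega
      | succ j =>
          have h0 := hmin 0 (Nat.succ_pos j)
          simp only [pyAccumulate, zero_add, List.getElem_cons_zero] at h0
          simp only [pvScan, if_neg (by omega : ¬ k - c ≤ 0)]
          have hj : j < cs.length := Nat.lt_of_succ_lt_succ hi
          have hk' : k - c ≤ (pyAccumulate 0 cs)[j]'(by rw [pv_length_pyAccumulate]; exact hj) := by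
            simp only [pyAccumulate, zero_add, List.getElem_cons_succ] at hk
            simp only [pv_pyAccumulate_shift c, List.getElem_map] at hk
            omega
          have := ih (k - c) (v + 1) j hj hk' (by
            intro j' hj'
            have := hmin (j' + 1) (Nat.succ_lt_succ hj')
            simp only [pyAccumulate, zero_add, List.getElem_cons_succ] at this
            simp only [pv_pyAccumulate_shift c, List.getElem_map] at this
            omega)
          omega

-- ===== VERDICT (by name: the statement is the Claim_ definition above) =====
theorem solution_spec : Claim_equal_solution := by
  intro k t _
  unfold Spec_solution solution solution_alt
  simp only []
  set d := PySem.Dict.counter t with hd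
  set S := PySem.Set.ofList t with hS
  have hvals : d.values = S.map (fun x => d.getD x 0) := by
    rw [PySem.Dict.values_eq_map_keys d (PySem.Dict.nodup_keys_counter t) 0, hd,
      PySem.Dict.keys_counter]
  have hcounts :
      PySem.List.sorted d.values (fun x => x) true
        = (PySem.List.sorted S (fun x => -(d.getD x 0)) false).map (fun x => d.getD x 0) := by
    rw [hvals, pv_map_sorted_key]
  set counts := (PySem.List.sorted S (fun x => -(d.getD x 0)) false).map (fun x => d.getD x 0)
    with hcts
  have hpos : ∀ x ∈ counts, 0 < x := by
    intro y hy
    obtain ⟨x, hx, rfl⟩ := List.mem_map.mp hy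
    have hxS : x ∈ S := (PySem.List.mem_sorted _ _ _ _).mp hx
    have hxt : x ∈ t := (PySem.Set.mem_ofList _ _).mp hxS
    rw [hd, PySem.Dict.getD_counter]
    exact_mod_cast List.count_pos_iff.mpr hxt
  rw [pv_loop_eq_scan, hcounts, ← hcts]
  set cum := pyAccumulate 0 counts with hcum
  have hlen : cum.length = counts.length := pv_length_pyAccumulate 0 counts
  obtain ⟨hle, hlt, hge⟩ := PySem.List.bisectLeft_spec cum k (pv_pyAccumulate_sorted counts hpos)
  set idx := PySem.List.bisectLeft cum k with hidx
  by_cases hcase : idx < cum.length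
  · rw [if_pos (by exact_mod_cast hcase)]
    rw [pv_scan_some counts k 0 idx (hlen ▸ hcase)
      (hge idx hcase (Nat.le_refl idx))
      (fun j hj => hlt j (by omega) hj)]
    omega
  · rw [if_neg (by exact_mod_cast hcase)]
    exact pv_scan_none counts k 0 (fun j hj => hlt j (by omega) (by omega))
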